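-- pv_equiv track=rewrite | github.com/mufarosimbisayi/python-toy-robot | world/maze/mufaros_maze.py | obstacles_cross
-- ===== SOURCE A (Python) =====
-- def obstacles_cross(obstacle1, obstacle2):
--     """
--     Checks if two obstacles cross at some point.
--
--     Args:
--         obstacle: A tuple representing the coordinate of the obstacle.
--
--     Returns:
--         _: A boolean indicating if the obstacles cross.
--     """
--
--     first_coordinates = create_obstacle_list(obstacle1)
--     second_coordinates = create_obstacle_list(obstacle2)
--     for first_coordinate in first_coordinates:
--         for second_coordinate in second_coordinates:
--             if first_coordinate[0] == second_coordinate[0] and first_coordinate[1] == second_coordinate[1]: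
--                 return True
--     return False
--
-- def create_obstacle_list(obstacle):
--     """
--     Creates a list of all the coordinates in an L shaped obstacle.
--
--     Args:
--         obstacle: A tuple representing the coordinate of the obstacle.
--
--     Returns:
--         _: A list of coordinates of the L shaped obstacle.
--     """
--
--     obstacle_list_x = [(obstacle[0], obstacle[1] + i) for i in range(0,200)]
--     obstacle_list_y = [(obstacle[0] + i, obstacle[1] + 199) for i in range(1,90)]
--     return obstacle_list_x + obstacle_list_y
-- ===== SOURCE B (Python) =====
-- def obstacles_cross(obstacle1, obstacle2):
--     x1, y1 = obstacle1[0], obstacle1[1]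
--     x2, y2 = obstacle2[0], obstacle2[1]
--     return (
--         (x1 == x2 and abs(y1 - y2) <= 199) or
--         (y1 == y2 and abs(x1 - x2) <= 88) or
--         (1 <= x1 - x2 <= 89 and 0 <= y1 - y2 <= 199) or
--         (1 <= x2 - x1 <= 89 and 0 <= y2 - y1 <= 199)
--     )
-- ===== Notes on version B (the rewrite author's own statement) =====
-- stated objective: simpler
-- what changed: B replaces materialising the two 289-point L-shaped coordinate lists and cross-scanning all 289x289 pairs with four direct integer interval-overlap tests on the vertical and horizontal segments of each obstacle.
import Mathlib
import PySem

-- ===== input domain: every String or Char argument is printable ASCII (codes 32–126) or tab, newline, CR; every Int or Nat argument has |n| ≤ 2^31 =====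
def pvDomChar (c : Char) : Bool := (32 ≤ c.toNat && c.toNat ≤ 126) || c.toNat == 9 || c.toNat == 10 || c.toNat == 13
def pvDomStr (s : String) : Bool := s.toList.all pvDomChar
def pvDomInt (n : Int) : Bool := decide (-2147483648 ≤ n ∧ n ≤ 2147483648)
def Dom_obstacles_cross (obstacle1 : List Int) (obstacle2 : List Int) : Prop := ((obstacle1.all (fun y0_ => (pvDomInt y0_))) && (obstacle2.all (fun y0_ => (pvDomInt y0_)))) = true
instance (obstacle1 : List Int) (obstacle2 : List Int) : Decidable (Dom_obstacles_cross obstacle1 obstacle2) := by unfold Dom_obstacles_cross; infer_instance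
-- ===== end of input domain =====

-- B replaces A's materialise-and-cross-scan of the two 289-point L-shapes by four direct integer
-- interval tests (vertical/vertical, horizontal/horizontal, and the two vertical/horizontal pairs).


-- ===== PORT A =====
-- obstacle[0] / obstacle[1] raise IndexError for lists shorter than 2 (excluded by Pre_);
-- the .getD 0 default is never reached under Pre_.
def create_obstacle_list (obstacle : List Int) : List (Int × Int) :=
  let x0 := (PySem.List.pyGet? obstacle 0).getD 0
  let y0 := (PySem.List.pyGet? obstacle 1).getD 0
  let obstacle_list_x := (PySem.List.pyRange 0 200 1).map (fun i => (x0, y0 + i))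
  let obstacle_list_y := (PySem.List.pyRange 1 90 1).map (fun i => (x0 + i, y0 + 199))
  obstacle_list_x ++ obstacle_list_y

def obstacles_cross (obstacle1 : List Int) (obstacle2 : List Int) : Bool :=
  let first_coordinates := create_obstacle_list obstacle1
  let second_coordinates := create_obstacle_list obstacle2
  -- the nested for-loops with early 'return True' are the nested 'any'
  first_coordinates.any (fun f => second_coordinates.any (fun s => f.1 == s.1 && f.2 == s.2))

-- ===== PORT B =====
def obstacles_cross_alt (obstacle1 : List Int) (obstacle2 : List Int) : Bool :=
  let x1 := (PySem.List.pyGet? obstacle1 0).getD 0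
  let y1 := (PySem.List.pyGet? obstacle1 1).getD 0
  let x2 := (PySem.List.pyGet? obstacle2 0).getD 0
  let y2 := (PySem.List.pyGet? obstacle2 1).getD 0
  decide (x1 = x2 ∧ |y1 - y2| ≤ 199) ||
  decide (y1 = y2 ∧ |x1 - x2| ≤ 88) ||
  decide (1 ≤ x1 - x2 ∧ x1 - x2 ≤ 89 ∧ 0 ≤ y1 - y2 ∧ y1 - y2 ≤ 199) ||
  decide (1 ≤ x2 - x1 ∧ x2 - x1 ≤ 89 ∧ 0 ≤ y2 - y1 ∧ y2 - y1 ≤ 199)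

-- ===== PRECONDITION & SPEC =====
-- Pre_ excludes exactly the inputs on which Python A raises IndexError (a list shorter than 2).
def Pre_obstacles_cross (obstacle1 : List Int) (obstacle2 : List Int) : Prop :=
  2 ≤ obstacle1.length ∧ 2 ≤ obstacle2.length
instance (obstacle1 : List Int) (obstacle2 : List Int) : Decidable (Pre_obstacles_cross obstacle1 obstacle2) := by unfold Pre_obstacles_cross; infer_instance
def pvWitness_obstacles_cross : List Int × List Int := ([0, 0], [50, 100])

def Spec_obstacles_cross (obstacle1 : List Int) (obstacle2 : List Int) (out : Bool) : Prop := out = obstacles_cross_alt obstacle1 obstacle2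
instance (obstacle1 : List Int) (obstacle2 : List Int) (out : Bool) : Decidable (Spec_obstacles_cross obstacle1 obstacle2 out) := by unfold Spec_obstacles_cross; infer_instance

-- ===== CLAIM (what is proved, stated in full; the proofs are below) =====
def Claim_equal_obstacles_cross : Prop := ∀ (obstacle1 : List Int) (obstacle2 : List Int), Dom_obstacles_cross obstacle1 obstacle2 → Pre_obstacles_cross obstacle1 obstacle2 → Spec_obstacles_cross obstacle1 obstacle2 (obstacles_cross obstacle1 obstacle2)

-- ===== LEMMAS AND PROOFS =====

-- core arithmetic fact: the cross-scan of the two point lists finds a common point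
-- iff one of the four segment-pair interval tests holds
theorem cross_core (x1 y1 x2 y2 : Int) :
    ((((PySem.List.pyRange 0 200 1).map (fun i => (x1, y1 + i))) ++ ((PySem.List.pyRange 1 90 1).map (fun i => (x1 + i, y1 + 199)))).any
      (fun f => ((((PySem.List.pyRange 0 200 1).map (fun i => (x2, y2 + i))) ++ ((PySem.List.pyRange 1 90 1).map (fun i => (x2 + i, y2 + 199)))).any
        (fun s => f.1 == s.1 && f.2 == s.2))))
    = (decide (x1 = x2 ∧ |y1 - y2| ≤ 199) ||
       decide (y1 = y2 ∧ |x1 - x2| ≤ 88) ||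
       decide (1 ≤ x1 - x2 ∧ x1 - x2 ≤ 89 ∧ 0 ≤ y1 - y2 ∧ y1 - y2 ≤ 199) ||
       decide (1 ≤ x2 - x1 ∧ x2 - x1 ≤ 89 ∧ 0 ≤ y2 - y1 ∧ y2 - y1 ≤ 199)) := by
  rw [Bool.eq_iff_iff]
  simp [List.any_append, List.any_map, List.any_eq_true, PySem.List.mem_pyRange_one, Function.comp, abs_le]
  constructor
  · rintro (⟨i, hi, ⟨j, hj, h1, h2⟩ | ⟨j, hj, h1, h2⟩⟩ | ⟨i, hi, ⟨j, hj, h1, h2⟩ | ⟨j, hj, h1, h2⟩⟩) <;> omega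
  · rintro (((⟨h1, h2, h3⟩ | ⟨h1, h2, h3⟩) | ⟨h1, h2, h3, h4⟩) | ⟨h1, h2, h3, h4⟩)
    · exact Or.inl ⟨max 0 (y2 - y1), by omega, Or.inl ⟨max 0 (y2 - y1) + y1 - y2, by omega, by omega, by omega⟩⟩
    · exact Or.inr ⟨max 1 (1 + x2 - x1), by omega, Or.inr ⟨max 1 (1 + x2 - x1) + x1 - x2, by omega, by omega, by omega⟩⟩
    · exact Or.inl ⟨y2 + 199 - y1, by omega, Or.inr ⟨x1 - x2, by omega, by omega, by omega⟩⟩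
    · exact Or.inr ⟨x2 - x1, by omega, Or.inl ⟨y1 + 199 - y2, by omega, by omega, by omega⟩⟩

-- ===== VERDICT (by name: the statement is the Claim_ definition above) =====
theorem obstacles_cross_spec : Claim_equal_obstacles_cross := by
  intro o1 o2 _ _
  unfold Spec_obstacles_cross obstacles_cross obstacles_cross_alt create_obstacle_list
  exact cross_core _ _ _ _
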